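-- pv_equiv track=rewrite | github.com/soulpacket/my_code_in_onion | untitled19/req_06.py | look_for
-- ===== SOURCE A (Python) =====
-- def look_for(d1, d2):
--     a = sorted(d1)
--     for i_2 in range(len(a)):
--         if a[i_2] == d2:
--             return a[i_2]
--         elif a[i_2] > d2:
--             return a[i_2-1]
--         elif i_2 == (len(a)-1):
--             return a[i_2]
-- ===== SOURCE B (Python) =====
-- def look_for(d1, d2):
--     # Single pass: track whether d2 occurs and the largest element below d2.
--     found = False
--     best = None
--     for x in d1:
--         if x == d2:
--             found = True
--         elif x < d2 and (best is None or best < x):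
--             best = x
--     return d2 if found else best
-- ===== Notes on version B (the rewrite author's own statement) =====
-- stated objective: faster
-- what changed: Replaces sort-then-scan with a single unsorted pass tracking membership of d2 and the largest element below d2; when d2 is absent and no element is below it, B returns None instead of A's accidental maximum from the a[-1] wraparound.
-- intended difference: On non-empty lists whose elements are all greater than d2, A returns the maximum of the list (an accident of a[i_2-1] wrapping to a[-1] at i_2 = 0), while B returns None, the intended 'no floor element exists' answer. — e.g. on look_for([5], 3): A returns some 5, B returns none
import Mathlib
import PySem

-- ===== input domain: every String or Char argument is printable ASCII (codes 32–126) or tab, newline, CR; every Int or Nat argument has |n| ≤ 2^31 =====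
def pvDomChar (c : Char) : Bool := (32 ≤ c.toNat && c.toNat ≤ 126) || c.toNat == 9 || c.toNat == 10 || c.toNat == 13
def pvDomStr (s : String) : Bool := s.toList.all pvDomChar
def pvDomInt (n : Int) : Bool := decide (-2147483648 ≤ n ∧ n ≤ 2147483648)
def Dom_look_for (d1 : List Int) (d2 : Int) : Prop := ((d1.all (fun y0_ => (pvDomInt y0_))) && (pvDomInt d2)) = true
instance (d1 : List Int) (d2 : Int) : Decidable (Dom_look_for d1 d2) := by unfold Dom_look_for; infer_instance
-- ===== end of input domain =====

-- B replaces A's sort-then-scan by a single unsorted pass; on lists whose elements all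
-- exceed d2, A's a[-1] wraparound yields the maximum while B returns None (see D_ below).

-- ===== PORT A =====
-- the 'for i_2 in range(len(a))' loop of A, with its three branches in order
def lookForGo (a : List Int) (d2 : Int) (i : Nat) : Option Int :=
  if h : i < a.length then
    let v := a[i]
    if v = d2 then some v
    else if d2 < v then PySem.List.pyGet? a ((i : Int) - 1)
    else if i = a.length - 1 then some v
    else lookForGo a d2 (i + 1)
  else none
termination_by a.length - i

def look_for (d1 : List Int) (d2 : Int) : Option Int :=
  let a := PySem.List.sorted d1 (fun x => x) false
  lookForGo a d2 0

-- ===== PORT B =====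
-- one fold over d1: fst = "d2 seen", snd = largest element < d2 seen so far
def lookForStep (d2 : Int) (p : Bool × Option Int) (x : Int) : Bool × Option Int :=
  if x = d2 then (true, p.2)
  else if x < d2 ∧ (p.2 = none ∨ ∃ b, p.2 = some b ∧ b < x) then (p.1, some x)
  else p

def look_for_alt (d1 : List Int) (d2 : Int) : Option Int :=
  let st := d1.foldl (lookForStep d2) (false, none)
  if st.1 then some d2 else st.2

-- ===== PRECONDITION & SPEC =====
-- On non-empty d1 with every element greater than d2, A returns the list's maximum
-- (a[i_2-1] wraps to a[-1] at i_2 = 0), while B returns none: there is no floor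
-- element, so none is the intended answer.
def D_look_for (d1 : List Int) (d2 : Int) : Prop := d1 ≠ [] ∧ ∀ x ∈ d1, d2 < x
instance (d1 : List Int) (d2 : Int) : Decidable (D_look_for d1 d2) := by unfold D_look_for; infer_instance

def Spec_look_for (d1 : List Int) (d2 : Int) (out : Option Int) : Prop := ¬ D_look_for d1 d2 → out = look_for_alt d1 d2
instance (d1 : List Int) (d2 : Int) (out : Option Int) : Decidable (Spec_look_for d1 d2 out) := by unfold Spec_look_for; infer_instance

def pvDiffWitness_look_for : List Int × Int := ([5], 3)
def pvDiffWitnessOut_look_for : (Option Int) × (Option Int) := (some 5, none)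

-- ===== CLAIM (what is proved, stated in full; the proofs are below) =====
def Claim_unchanged_look_for : Prop := ∀ (d1 : List Int) (d2 : Int), Dom_look_for d1 d2 → Spec_look_for d1 d2 (look_for d1 d2)
def Claim_changed_look_for : Prop := Dom_look_for (pvDiffWitness_look_for.1) (pvDiffWitness_look_for.2) ∧ D_look_for (pvDiffWitness_look_for.1) (pvDiffWitness_look_for.2) ∧ look_for (pvDiffWitness_look_for.1) (pvDiffWitness_look_for.2) = pvDiffWitnessOut_look_for.1 ∧ look_for_alt (pvDiffWitness_look_for.1) (pvDiffWitness_look_for.2) = pvDiffWitnessOut_look_for.2 ∧ pvDiffWitnessOut_look_for.1 ≠ pvDiffWitnessOut_look_for.2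
def Claim_exact_look_for : Prop := ∀ (d1 : List Int) (d2 : Int), Dom_look_for d1 d2 → D_look_for d1 d2 → look_for d1 d2 ≠ look_for_alt d1 d2

-- ===== LEMMAS AND PROOFS =====

-- the common target value: d2 itself if present, otherwise the max of the elements below d2
def lfTarget (d1 : List Int) (d2 : Int) : Option Int :=
  if d2 ∈ d1 then some d2 else (d1.filter (fun x => decide (x < d2))).max?

-- B's fold state, characterised
theorem lookForStep_fst (d2 : Int) (l : List Int) (p : Bool × Option Int) :
    (l.foldl (lookForStep d2) p).1 = (p.1 || decide (d2 ∈ l)) := by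
  induction l generalizing p with
  | nil => simp
  | cons x t ih =>
    simp only [List.foldl_cons, ih, List.mem_cons]
    by_cases hx : x = d2
    · subst hx; simp [lookForStep]
    · have h1 : (lookForStep d2 p x).1 = p.1 := by
        unfold lookForStep; rw [if_neg hx]; split <;> rfl
      have h2 : ¬ d2 = x := fun h => hx h.symm
      rw [h1]; simp [h2]

theorem lookForStep_snd (d2 : Int) (l : List Int) (p : Bool × Option Int) :
    (l.foldl (lookForStep d2) p).2 =
      ((p.2.toList ++ l.filter (fun x => decide (x < d2))).max?) := by
  induction l generalizing p with
  | nil => cases p2 : p.2 <;> simp [p2]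
  | cons x t ih =>
    simp only [List.foldl_cons, ih, List.filter_cons]
    by_cases hx : x = d2
    · simp [lookForStep, hx]
    · by_cases hlt : x < d2
      · simp only [hlt, decide_true, if_pos]
        cases p2 : p.2 with
        | none => simp [lookForStep, hx, hlt, p2]
        | some b =>
          by_cases hb : b < x
          · have h1 : (lookForStep d2 p x).2 = some x := by
              simp [lookForStep, hx, hlt, p2, hb]
            rw [h1]
            simp only [Option.toList_some, List.singleton_append, List.max?_cons',
              List.foldl_cons, Option.some.injEq]
            have hm : max b x = x := by omega
            rw [hm]
          · have h1 : (lookForStep d2 p x).2 = some b := by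
              simp [lookForStep, hx, hlt, p2, hb]
            rw [h1]
            simp only [Option.toList_some, List.singleton_append, List.max?_cons',
              List.foldl_cons, Option.some.injEq]
            have hm : max b x = b := by omega
            rw [hm]
      · have h1 : (lookForStep d2 p x).2 = p.2 ∧ (lookForStep d2 p x) = p := by
          constructor <;> simp [lookForStep, hx, hlt]
        simp [hlt, h1.2]

theorem alt_eq_target (d1 : List Int) (d2 : Int) :
    look_for_alt d1 d2 = lfTarget d1 d2 := by
  have h0 : look_for_alt d1 d2 =
      (if (d1.foldl (lookForStep d2) (false, none)).1 then some d2
       else (d1.foldl (lookForStep d2) (false, none)).2) := rfl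
  unfold lfTarget
  rw [h0, lookForStep_fst, lookForStep_snd]
  by_cases h : d2 ∈ d1 <;> simp [h]

-- max? of a ≤-sorted non-empty list is its last element
theorem max?_of_pairwise_le (l : List Int) (hl : l ≠ [])
    (hs : l.Pairwise (· ≤ ·)) : l.max? = some (l.getLast hl) := by
  induction l with
  | nil => exact absurd rfl hl
  | cons x t ih =>
    cases t with
    | nil => simp [List.max?]
    | cons y ys =>
      have hs' := (List.pairwise_cons.mp hs).2
      have hx : ∀ z ∈ y :: ys, x ≤ z := (List.pairwise_cons.mp hs).1
      have hih := ih (by simp) hs'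
      rw [List.getLast_cons (by simp)]
      rw [List.max?_cons'] at hih ⊢
      rw [List.foldl_cons, max_eq_right (hx y (by simp))]
      exact hih

-- max? is invariant under permutation (for Int)
theorem perm_max?_int {l1 l2 : List Int} (h : l1.Perm l2) : l1.max? = l2.max? := by
  rcases h1 : l1.max? with _ | m1
  · rw [List.max?_eq_none_iff] at h1
    subst h1
    rw [← h.nil_eq]
    rfl
  · symm
    rw [List.max?_eq_some_iff] at h1 ⊢
    exact ⟨h.mem_iff.mp h1.1, fun b hb => h1.2 b (h.mem_iff.mpr hb)⟩

-- A's loop on a sorted list, characterised outside the wraparound case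
theorem lookForGo_char (d2 : Int) :
    ∀ (rest pre : List Int) (x : Int),
    (pre ++ x :: rest).Pairwise (· ≤ ·) →
    (∀ e ∈ pre, e < d2) →
    (pre = [] → x ≤ d2) →
    lookForGo (pre ++ x :: rest) d2 pre.length = lfTarget (pre ++ x :: rest) d2 := by
  intro rest
  induction rest with
  | nil =>
    intro pre x hs hpre hhead
    have hlen : pre.length < (pre ++ [x]).length := by simp
    rw [lookForGo]
    simp only [hlen, dif_pos]
    have hget : (pre ++ [x])[pre.length] = x := by
      simp
    rw [hget]
    by_cases hx : x = d2
    · simp [hx, lfTarget]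
    · by_cases hgt : d2 < x
      · -- a[i_2-1]: pre is non-empty here (wraparound excluded by the head hypothesis)
        have hpne : pre ≠ [] := by
          intro h; have := hhead h; omega
        simp only [hx, if_false, hgt, if_true]
        have hpl : 0 < pre.length := List.length_pos_of_ne_nil hpne
        have hidx : ((pre.length : Int) - 1) = ((pre.length - 1 : Nat) : Int) := by omega
        rw [hidx, PySem.List.pyGet?_natCast]
        have hlt' : pre.length - 1 < pre.length := by omega
        rw [List.getElem?_append_left hlt', List.getElem?_eq_getElem hlt']
        unfold lfTarget
        have hmem : d2 ∉ pre ++ [x] := by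
          simp only [List.mem_append, List.mem_singleton]
          rintro (h | h)
          · exact absurd (hpre d2 h) (by omega)
          · omega
        rw [if_neg hmem]
        have hfil : (pre ++ [x]).filter (fun e => decide (e < d2)) = pre := by
          rw [List.filter_append]
          have h1 : pre.filter (fun e => decide (e < d2)) = pre := by
            rw [List.filter_eq_self]; intro e he; simpa using hpre e he
          have h2 : ([x] : List Int).filter (fun e => decide (e < d2)) = [] := by
            simp; omega
          rw [h1, h2, List.append_nil]
        rw [hfil]
        rw [max?_of_pairwise_le pre hpne (List.pairwise_append.mp hs).1]
        simp [List.getLast_eq_getElem]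
      · have hxlt : x < d2 := by omega
        simp only [hx, if_false, hgt, if_false]
        have hlast : pre.length = (pre ++ [x]).length - 1 := by simp
        rw [if_pos hlast]
        unfold lfTarget
        have hmem : d2 ∉ pre ++ [x] := by
          simp only [List.mem_append, List.mem_singleton]
          rintro (h | h)
          · exact absurd (hpre d2 h) (by omega)
          · omega
        rw [if_neg hmem]
        have hfil : (pre ++ [x]).filter (fun e => decide (e < d2)) = pre ++ [x] := by
          rw [List.filter_eq_self]
          intro e he
          simp only [List.mem_append, List.mem_singleton] at he
          rcases he with h | h
          · simpa using hpre e h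
          · subst h; simpa using hxlt
        rw [hfil]
        rw [max?_of_pairwise_le _ (by simp) hs]
        simp
  | cons y ys ih =>
    intro pre x hs hpre hhead
    have hlen : pre.length < (pre ++ x :: y :: ys).length := by simp
    rw [lookForGo]
    simp only [hlen, dif_pos]
    have hget : (pre ++ x :: y :: ys)[pre.length] = x := by simp
    rw [hget]
    by_cases hx : x = d2
    · simp [hx, lfTarget]
    · by_cases hgt : d2 < x
      · -- wraparound-free return of a[i-1]: pre is non-empty here
        have hpne : pre ≠ [] := by
          intro h; have := hhead h; omega
        simp only [hx, if_false, hgt, if_true]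
        -- pyGet? (pre ++ …) (pre.length - 1) = some (pre.getLast)
        have hpl : 0 < pre.length := List.length_pos_of_ne_nil hpne
        have hidx : ((pre.length : Int) - 1) = ((pre.length - 1 : Nat) : Int) := by omega
        rw [hidx, PySem.List.pyGet?_natCast]
        have hlt' : pre.length - 1 < pre.length := by omega
        rw [List.getElem?_append_left hlt', List.getElem?_eq_getElem hlt']
        -- target: d2 absent, filter = pre, max = getLast pre = q
        unfold lfTarget
        have hxle : ∀ e ∈ y :: ys, x ≤ e := by
          have := List.pairwise_append.mp hs
          intro e he
          exact ((List.pairwise_cons.mp this.2.1).1) e he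
        have hmem : d2 ∉ pre ++ x :: y :: ys := by
          simp only [List.mem_append, List.mem_cons]
          rintro (h | h | h)
          · exact absurd (hpre d2 h) (by omega)
          · omega
          · have := hxle d2 (List.mem_cons.mpr h); omega
        rw [if_neg hmem]
        have hfil : (pre ++ x :: y :: ys).filter (fun e => decide (e < d2)) = pre := by
          rw [List.filter_append]
          have h1 : pre.filter (fun e => decide (e < d2)) = pre := by
            rw [List.filter_eq_self]; intro e he; simpa using hpre e he
          have h2 : (x :: y :: ys).filter (fun e => decide (e < d2)) = [] := by
            rw [List.filter_eq_nil_iff]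
            intro e he
            simp only [List.mem_cons] at he
            rcases he with h | h
            · subst h; simp; omega
            · have := hxle e (List.mem_cons.mpr h); simp; omega
          rw [h1, h2, List.append_nil]
        rw [hfil]
        have hpres : pre.Pairwise (· ≤ ·) := (List.pairwise_append.mp hs).1
        rw [max?_of_pairwise_le pre hpne hpres]
        simp [List.getLast_eq_getElem]
      · -- x < d2: loop continues (not the last index)
        have hxlt : x < d2 := by omega
        simp only [hx, if_false, hgt, if_false]
        have hne : ¬ pre.length = (pre ++ x :: y :: ys).length - 1 := by
          simp
        simp only [hne, if_false]
        have hre : pre ++ x :: y :: ys = (pre ++ [x]) ++ y :: ys := by simp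
        have hlen2 : pre.length + 1 = (pre ++ [x]).length := by simp
        rw [hlen2, hre]
        exact ih (pre ++ [x]) y (by rw [← hre]; exact hs)
          (by intro e he
              simp only [List.mem_append, List.mem_singleton] at he
              rcases he with h | h
              · exact hpre e h
              · subst h; exact hxlt)
          (by intro h; simp at h)

theorem a_eq_target_of_notD (d1 : List Int) (d2 : Int) (hD : ¬ D_look_for d1 d2) :
    look_for d1 d2 = lfTarget d1 d2 := by
  unfold look_for
  rcases ha : PySem.List.sorted d1 (fun x => x) false with _ | ⟨x, rest⟩
  · have h1 : d1 = [] := by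
      have := (PySem.List.sorted_eq_nil_iff d1 (fun x => x) false).mp ha
      exact this
    subst h1
    rw [lookForGo]
    simp [lfTarget]
  · have hperm : (x :: rest).Perm d1 := ha ▸ PySem.List.sorted_perm d1 _ _
    have hs : (x :: rest).Pairwise (· ≤ ·) := by
      have := PySem.List.sorted_pairwise d1 (fun x => x)
      rw [ha] at this
      exact this
    have hne : d1 ≠ [] := by
      intro h
      have := hperm.mem_iff.mp (List.mem_cons_self)
      rw [h] at this
      simp at this
    have hxle : x ≤ d2 := by
      unfold D_look_for at hD
      push_neg at hD
      obtain ⟨e, he, hle⟩ := hD hne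
      have hmin : ∀ y ∈ d1, x ≤ y := PySem.List.key_head_sorted_le d1 (fun x => x) ha
      have := hmin e he
      omega
    have := lookForGo_char d2 rest [] x hs (by simp) (fun _ => hxle)
    simp only [List.nil_append, List.length_nil] at this
    rw [this]
    -- lfTarget is permutation-invariant
    unfold lfTarget
    have hm : (d2 ∈ x :: rest) ↔ (d2 ∈ d1) := hperm.mem_iff
    by_cases h : d2 ∈ d1
    · simp [h, hm.mpr h]
    · rw [if_neg (fun hc => h (hm.mp hc)), if_neg h]
      exact perm_max?_int (hperm.filter _)

theorem a_max_of_D (d1 : List Int) (d2 : Int) (hD : D_look_for d1 d2) :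
    ∃ m, look_for d1 d2 = some m := by
  obtain ⟨hne, hall⟩ := hD
  unfold look_for
  rcases ha : PySem.List.sorted d1 (fun x => x) false with _ | ⟨x, rest⟩
  · exact absurd ((PySem.List.sorted_eq_nil_iff d1 (fun x => x) false).mp ha) hne
  · have hperm : (x :: rest).Perm d1 := ha ▸ PySem.List.sorted_perm d1 _ _
    have hx : d2 < x := hall x (hperm.mem_iff.mp (by simp))
    rw [lookForGo]
    have hlen : 0 < (x :: rest).length := by simp
    simp only [hlen, dif_pos]
    have hg : (x :: rest)[0] = x := rfl
    rw [hg]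
    have hxne : ¬ x = d2 := by omega
    simp only [hxne, if_false, hx, if_true]
    have : ((0 : Nat) : Int) - 1 = -1 := by norm_num
    rw [this, PySem.List.pyGet?_neg_one]
    exact ⟨(x :: rest).getLast (by simp), by simp [List.getLast?_eq_getLast]⟩

-- ===== VERDICT (by name: the statement is the Claim_ definition above) =====
theorem look_for_spec : Claim_unchanged_look_for := by
  intro d1 d2 _ hD
  rw [a_eq_target_of_notD d1 d2 hD, alt_eq_target]

theorem look_for_changed : Claim_changed_look_for := by
  unfold Claim_changed_look_for
  refine ⟨by decide, by decide, ?_, by decide, by decide⟩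
  show look_for [5] 3 = some 5
  show lookForGo [5] 3 0 = some 5
  rw [lookForGo]
  norm_num [PySem.List.pyGet?_neg_one]

theorem look_for_tight : Claim_exact_look_for := by
  intro d1 d2 _ hD
  obtain ⟨m, hm⟩ := a_max_of_D d1 d2 hD
  rw [hm, alt_eq_target]
  unfold lfTarget
  obtain ⟨hne, hall⟩ := hD
  have h1 : d2 ∉ d1 := fun h => absurd (hall d2 h) (by omega)
  rw [if_neg h1]
  have h2 : d1.filter (fun x => decide (x < d2)) = [] := by
    rw [List.filter_eq_nil_iff]
    intro e he
    have := hall e he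
    simp; omega
  rw [h2]
  simp
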